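-- pv_equiv track=rewrite | github.com/BonnieProsper/ScoutSearch | src/scout/search/engine.py | _matches_phrases
-- ===== SOURCE A (Python) =====
-- def _matches_phrases(
--     tokens: list[str],
--     phrases: list[list[str]],
-- ) -> bool:
--     for phrase in phrases:
--         plen = len(phrase)
--         if not any(
--             tokens[i : i + plen] == phrase
--             for i in range(len(tokens) - plen + 1)
--         ):
--             return False
--     return True
-- ===== SOURCE B (Python) =====
-- def _starts_with(phrase, tokens):
--     if len(phrase) > len(tokens):
--         return False
--     for a, b in zip(phrase, tokens):
--         if a != b:
--             return False
--     return True
--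
--
-- def _occurs(phrase, tokens):
--     while True:
--         if _starts_with(phrase, tokens):
--             return True
--         if not tokens:
--             return False
--         tokens = tokens[1:]
--
--
-- def _matches_phrases(
--     tokens: list[str],
--     phrases: list[list[str]],
-- ) -> bool:
--     return all(_occurs(phrase, tokens) for phrase in phrases)
-- ===== Notes on version B (the rewrite author's own statement) =====
-- stated objective: alternative
-- what changed: Replaces the index-range scan with per-position slice-and-compare by a structural suffix walk: a prefix check at each suffix of the token list, no index arithmetic and no slice allocation.
import Mathlib
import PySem

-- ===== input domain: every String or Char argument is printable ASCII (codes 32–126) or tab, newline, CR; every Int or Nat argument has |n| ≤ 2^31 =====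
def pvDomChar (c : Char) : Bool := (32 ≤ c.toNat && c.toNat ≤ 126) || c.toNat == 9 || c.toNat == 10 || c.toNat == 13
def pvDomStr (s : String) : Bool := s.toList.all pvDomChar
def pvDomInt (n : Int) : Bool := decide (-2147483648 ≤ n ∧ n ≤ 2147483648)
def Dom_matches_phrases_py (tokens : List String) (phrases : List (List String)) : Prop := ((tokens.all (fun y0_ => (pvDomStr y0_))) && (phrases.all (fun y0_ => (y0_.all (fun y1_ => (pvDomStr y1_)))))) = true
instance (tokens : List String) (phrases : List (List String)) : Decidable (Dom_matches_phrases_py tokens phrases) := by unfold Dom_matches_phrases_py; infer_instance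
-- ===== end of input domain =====

-- B replaces A's index-range scan with slice comparisons by a structural walk over the suffixes
-- of the token list with an explicit prefix check (objective: alternative decomposition, same cost).


-- ===== PORT A =====
-- any(tokens[i : i + plen] == phrase for i in range(len(tokens) - plen + 1))
def pvAnyA (tokens : List String) (phrase : List String) : Bool :=
  (PySem.List.pyRange 0 ((tokens.length : Int) - (phrase.length : Int) + 1) 1).any
    (fun i => PySem.List.slice tokens (some i) (some (i + (phrase.length : Int))) == phrase)

-- the for-loop over phrases with its early 'return False'
def matches_phrases_py (tokens : List String) (phrases : List (List String)) : Bool :=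
  match phrases with
  | [] => true
  | phrase :: rest =>
      if !(pvAnyA tokens phrase) then false else matches_phrases_py tokens rest

-- ===== PORT B =====
-- _starts_with: length guard, then the zip loop with early 'return False'
def pvStartsWith (phrase tokens : List String) : Bool :=
  if tokens.length < phrase.length then false
  else (phrase.zip tokens).all (fun ab => ab.1 == ab.2)

-- _occurs: the while loop that drops one token each round
def pvOccurs (phrase : List String) : List String → Bool
  | [] => pvStartsWith phrase []
  | t :: rest => if pvStartsWith phrase (t :: rest) then true else pvOccurs phrase rest

def matches_phrases_py_alt (tokens : List String) (phrases : List (List String)) : Bool :=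
  phrases.all (fun phrase => pvOccurs phrase tokens)

-- ===== PRECONDITION & SPEC =====
def Spec_matches_phrases_py (tokens : List String) (phrases : List (List String)) (out : Bool) : Prop := out = matches_phrases_py_alt tokens phrases
instance (tokens : List String) (phrases : List (List String)) (out : Bool) : Decidable (Spec_matches_phrases_py tokens phrases out) := by unfold Spec_matches_phrases_py; infer_instance

-- ===== CLAIM (what is proved, stated in full; the proofs are below) =====
def Claim_equal_matches_phrases_py : Prop := ∀ (tokens : List String) (phrases : List (List String)), Dom_matches_phrases_py tokens phrases → Spec_matches_phrases_py tokens phrases (matches_phrases_py tokens phrases)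

-- ===== LEMMAS AND PROOFS =====

-- _starts_with checks that the phrase is the length-|phrase| prefix of tokens
theorem pvStartsWith_eq_take (p xs : List String) :
    pvStartsWith p xs = (xs.take p.length == p) := by
  induction p generalizing xs with
  | nil => simp [pvStartsWith]
  | cons a p' ih =>
    cases xs with
    | nil => simp [pvStartsWith]
    | cons x xs' =>
      by_cases h : xs'.length < p'.length
      · have hfalse : (xs'.take p'.length == p') = false := by
          rw [beq_eq_false_iff_ne]
          intro he
          have := congrArg List.length he
          simp [List.length_take] at this
          omega
        simp [pvStartsWith, h, hfalse]
      · have hz : (p'.zip xs').all (fun ab => ab.1 == ab.2) = (xs'.take p'.length == p') := by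
          rw [← ih xs']
          simp [pvStartsWith, h]
        have hc : (a == x) = (x == a) := by
          by_cases hax : a = x
          · subst hax; rfl
          · rw [beq_eq_false_iff_ne.mpr hax, beq_eq_false_iff_ne.mpr (Ne.symm hax)]
        simp [pvStartsWith, h, hz, hc]

-- reference form of A's inner any, over Nat indices
def pvNatAny (xs p : List String) : Bool :=
  (List.range (xs.length - p.length + 1)).any (fun i => (xs.drop i).take p.length == p)

theorem pvAnyA_eq_natAny (xs p : List String) : pvAnyA xs p = pvNatAny xs p := by
  unfold pvAnyA pvNatAny
  by_cases h : p.length ≤ xs.length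
  · rw [PySem.List.pyRange_one]
    have ht : (((xs.length : Int) - p.length + 1) - 0).toNat = xs.length - p.length + 1 := by omega
    rw [ht, List.any_map]
    congr 1
    funext k
    simp only [Function.comp_apply, zero_add]
    rw [PySem.List.slice_natCast_add]
  · rw [PySem.List.pyRange_one_eq_nil (by omega)]
    have h1 : xs.length - p.length + 1 = 1 := by omega
    rw [h1, List.range_one]
    have hf : (xs == p) = false := by
      rw [beq_eq_false_iff_ne]
      intro he
      have := congrArg List.length he
      omega
    simp [List.take_of_length_le (by omega : xs.length ≤ p.length), hf]

theorem pvNatAny_cons (x : String) (t p : List String) :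
    pvNatAny (x :: t) p = (pvStartsWith p (x :: t) || pvNatAny t p) := by
  rw [pvStartsWith_eq_take]
  by_cases h : p.length ≤ t.length
  · have hK : (x :: t).length - p.length + 1 = (t.length - p.length + 1) + 1 := by
      simp only [List.length_cons]; omega
    rw [pvNatAny, hK, List.range_succ_eq_map]
    simp only [List.any_cons, List.any_map, List.drop_zero, pvNatAny]
    have hfun : ((fun i => List.take p.length (List.drop i (x :: t)) == p) ∘ Nat.succ)
        = (fun i => List.take p.length (List.drop i t) == p) := by
      funext k
      simp [Function.comp]
    rw [hfun]
  · have h1 : (x :: t).length - p.length + 1 = 1 := by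
      simp only [List.length_cons]; omega
    have h2 : t.length - p.length + 1 = 1 := by omega
    rw [pvNatAny, pvNatAny, h1, h2, List.range_one]
    have hf : (t == p) = false := by
      rw [beq_eq_false_iff_ne]
      intro he
      have := congrArg List.length he
      omega
    simp [List.take_of_length_le (by omega : t.length ≤ p.length), hf]

theorem pvNatAny_eq_occurs (xs p : List String) : pvNatAny xs p = pvOccurs p xs := by
  induction xs with
  | nil =>
      rw [pvNatAny, pvOccurs, pvStartsWith_eq_take]
      simp [List.range_one]
  | cons x t ih =>
      rw [pvNatAny_cons, ih, pvOccurs]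
      by_cases h : pvStartsWith p (x :: t) <;> simp [h]

theorem matches_phrases_eq (tokens : List String) (phrases : List (List String)) :
    matches_phrases_py tokens phrases = matches_phrases_py_alt tokens phrases := by
  induction phrases with
  | nil => rfl
  | cons p ps ih =>
      simp only [matches_phrases_py, matches_phrases_py_alt, List.all_cons]
      rw [pvAnyA_eq_natAny, pvNatAny_eq_occurs]
      cases hocc : pvOccurs p tokens <;>
        simp [ih, matches_phrases_py_alt]

-- ===== VERDICT (by name: the statement is the Claim_ definition above) =====
theorem matches_phrases_py_spec : Claim_equal_matches_phrases_py := by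
  intro tokens phrases _
  unfold Spec_matches_phrases_py
  exact matches_phrases_eq tokens phrases
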